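-- pv_equiv track=rewrite | github.com/sb-ai-lab/HypEx | hypex/extensions/faiss_exploded.py | _partition_load
-- ===== SOURCE A (Python) =====
-- from typing import (
--     Literal,
--     Iterable
-- )
--
-- def _partition_load(partition_iter: Iterable, batch_size: int):
--     """
--     Load part batch from partition to driver.
--
--     Args
--     ----
--         partition_iter: `Iterable`
--             iterator over partition.
--
--         batch_size: `int`
--             size of uploading batch from partition.
--     """
--     batch = []
--     for row in partition_iter:
--         batch.append(list(row["features"]))
--         if len(batch) >= batch_size:
--             yield batch
--             batch = []
--     if batch:
--         yield batch
-- ===== SOURCE B (Python) =====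
-- from itertools import islice
--
-- def _partition_load(partition_iter, batch_size):
--     """Chunk rows' feature lists by pulling fixed-size slices from an iterator."""
--     features = (list(row["features"]) for row in partition_iter)
--     while True:
--         batch = list(islice(features, batch_size))
--         if not batch:
--             return
--         yield batch
-- ===== Notes on version B (the rewrite author's own statement) =====
-- stated objective: idiomatic
-- what changed: Instead of appending rows one at a time and testing len(batch) >= batch_size, B maps rows to their feature lists and pulls fixed-size chunks with itertools.islice until the iterator is exhausted.
-- outside the precondition, e.g. on _partition_load([{'features': [1]}, {'features': [2]}], 0): A returns [[[1]], [[2]]], B returns []; on _partition_load([{'features': [1]}], -1): A returns [[[1]]], B raises ValueError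
import Mathlib
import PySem

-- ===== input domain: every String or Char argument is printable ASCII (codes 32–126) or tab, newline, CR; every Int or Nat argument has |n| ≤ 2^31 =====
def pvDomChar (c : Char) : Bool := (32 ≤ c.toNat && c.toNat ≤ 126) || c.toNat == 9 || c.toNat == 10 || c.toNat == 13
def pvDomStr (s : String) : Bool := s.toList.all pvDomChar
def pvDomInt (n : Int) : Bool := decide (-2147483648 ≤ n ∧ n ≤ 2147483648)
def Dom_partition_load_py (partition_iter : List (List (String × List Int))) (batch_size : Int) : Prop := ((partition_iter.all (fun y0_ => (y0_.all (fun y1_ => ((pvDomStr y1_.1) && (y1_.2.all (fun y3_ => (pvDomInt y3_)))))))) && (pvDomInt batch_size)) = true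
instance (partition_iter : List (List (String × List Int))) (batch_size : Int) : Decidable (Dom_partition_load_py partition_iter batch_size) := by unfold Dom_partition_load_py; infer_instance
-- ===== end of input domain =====

-- B replaces A's one-row-at-a-time accumulator with islice-style fixed-size chunking of the
-- mapped feature lists (idiomatic; return value only — both are generators materialized as lists).

-- row["features"] : first-match association-list lookup (KeyError = none, excluded by Pre_)
def pvFeatures (row : List (String × List Int)) : List Int :=
  (row.lookup "features").getD []

-- ===== PORT A =====
-- A: fold keeping (emitted batches, current batch); append row, flush when len(batch) >= batch_size;
-- final non-empty batch is yielded at the end.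
def partition_load_py (partition_iter : List (List (String × List Int))) (batch_size : Int) : List (List (List Int)) :=
  let st := partition_iter.foldl
    (fun (s : List (List (List Int)) × List (List Int)) row =>
      let batch := s.2 ++ [pvFeatures row]
      if batch_size ≤ (batch.length : Int) then (s.1 ++ [batch], [])
      else (s.1, batch))
    ([], [])
  if st.2 ≠ [] then st.1 ++ [st.2] else st.1

-- ===== PORT B =====
-- B: map rows to features, then take fixed-size slices until empty.
-- (x :: xs.take (k-1)) = take k (x::xs): structural recursion peeling one chunk per step.
def pvChunks (k : Nat) : List (List Int) → List (List (List Int))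
  | [] => []
  | x :: xs => (x :: xs.take (k - 1)) :: pvChunks k (xs.drop (k - 1))
termination_by xs => xs.length
decreasing_by simp [List.length_drop]

def partition_load_py_alt (partition_iter : List (List (String × List Int))) (batch_size : Int) : List (List (List Int)) :=
  pvChunks batch_size.toNat (partition_iter.map pvFeatures)

-- ===== PRECONDITION & SPEC =====
-- Pre_ excludes (a) rows without a "features" key, where A raises KeyError, and
-- (b) batch_size <= 0, a corner nobody specifies: A returns one singleton batch per row there,
-- while B's islice chunking returns [] for batch_size = 0 and raises ValueError for negative batch_size.
def Pre_partition_load_py (partition_iter : List (List (String × List Int))) (batch_size : Int) : Prop :=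
  1 ≤ batch_size ∧ ∀ row ∈ partition_iter, (row.lookup "features").isSome = true
instance (partition_iter : List (List (String × List Int))) (batch_size : Int) : Decidable (Pre_partition_load_py partition_iter batch_size) := by unfold Pre_partition_load_py; infer_instance

def pvWitness_partition_load_py : (List (List (String × List Int))) × Int :=
  ([[("features", [1, 2])], [("features", [3])], [("features", [])]], 2)

def Spec_partition_load_py (partition_iter : List (List (String × List Int))) (batch_size : Int) (out : List (List (List Int))) : Prop := out = partition_load_py_alt partition_iter batch_size
instance (partition_iter : List (List (String × List Int))) (batch_size : Int) (out : List (List (List Int))) : Decidable (Spec_partition_load_py partition_iter batch_size out) := by unfold Spec_partition_load_py; infer_instance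

-- ===== CLAIM (what is proved, stated in full; the proofs are below) =====
def Claim_equal_partition_load_py : Prop := ∀ (partition_iter : List (List (String × List Int))) (batch_size : Int), Dom_partition_load_py partition_iter batch_size → Pre_partition_load_py partition_iter batch_size → Spec_partition_load_py partition_iter batch_size (partition_load_py partition_iter batch_size)

-- ===== LEMMAS AND PROOFS =====

-- chunking of (batch ++ rows) where the current batch already holds batch.length < k rows
def pvChunkSpec (k : Nat) (batch : List (List Int)) (rows : List (List Int)) : List (List (List Int)) :=
  if batch = [] ∧ rows = [] then []
  else (batch ++ rows.take (k - batch.length)) :: pvChunks k (rows.drop (k - batch.length))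

lemma pvChunks_nil (k : Nat) : pvChunks k [] = [] := by simp [pvChunks]

lemma pvChunks_cons (k : Nat) (x : List Int) (xs : List (List Int)) :
    pvChunks k (x :: xs) = (x :: xs.take (k - 1)) :: pvChunks k (xs.drop (k - 1)) := by
  simp [pvChunks]

lemma pvChunkSpec_nil (k : Nat) (hk : 1 ≤ k) (rows : List (List Int)) :
    pvChunkSpec k [] rows = pvChunks k rows := by
  cases rows with
  | nil => simp [pvChunkSpec, pvChunks_nil]
  | cons x xs =>
      obtain ⟨n, rfl⟩ : ∃ n, k = n + 1 := ⟨k - 1, by omega⟩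
      simp [pvChunkSpec, pvChunks_cons]

lemma pvFold_eq_chunkSpec (bs : Int) (hbs : 1 ≤ bs)
    (rows : List (List Int)) :
    ∀ (batch : List (List Int)) (out : List (List (List Int))),
      batch.length < bs.toNat →
      (let st := rows.foldl
          (fun (s : List (List (List Int)) × List (List Int)) f =>
            let b := s.2 ++ [f]
            if bs ≤ (b.length : Int) then (s.1 ++ [b], []) else (s.1, b))
          (out, batch)
       if st.2 ≠ [] then st.1 ++ [st.2] else st.1)
      = out ++ pvChunkSpec bs.toNat batch rows := by
  induction rows with
  | nil =>
      intro batch out _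
      by_cases hb : batch = []
      · subst hb; simp [pvChunkSpec]
      · simp [pvChunkSpec, hb, pvChunks_nil]
  | cons r rs ih =>
      intro batch out hlen
      set k := bs.toNat with hk
      have hk1 : 1 ≤ k := by omega
      simp only [List.foldl_cons]
      by_cases hfull : bs ≤ ((batch ++ [r]).length : Int)
      · -- flush: batch.length + 1 = k
        have hfull' : bs ≤ (batch.length : Int) + 1 := by simpa using hfull
        have hlen' : batch.length + 1 = k := by omega
        rw [if_pos hfull]
        rw [ih [] (out ++ [batch ++ [r]]) (by simp only [List.length_nil]; omega)]
        rw [pvChunkSpec_nil k hk1]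
        have : pvChunkSpec k batch (r :: rs)
            = (batch ++ [r]) :: pvChunks k rs := by
          simp only [pvChunkSpec]
          have hne : ¬ (batch = [] ∧ (r :: rs : List (List Int)) = []) := by simp
          rw [if_neg hne]
          have h1 : k - batch.length = 1 := by omega
          rw [h1]
          simp [List.take, List.drop]
        rw [this, List.append_assoc]
        rfl
      · -- keep accumulating: batch.length + 1 < k
        have hfull' : ¬ bs ≤ (batch.length : Int) + 1 := by simpa using hfull
        have hlt : batch.length + 1 < k := by omega
        rw [if_neg hfull]
        rw [ih (batch ++ [r]) out (by simpa using hlt)]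
        congr 1
        simp only [pvChunkSpec]
        have hne1 : ¬ (batch = [] ∧ (r :: rs : List (List Int)) = []) := by simp
        have hne2 : ¬ (batch ++ [r] = [] ∧ rs = []) := by simp
        rw [if_neg hne1, if_neg hne2]
        have h2 : 2 ≤ k - batch.length := by omega
        have htake : (r :: rs).take (k - batch.length)
            = r :: rs.take (k - (batch ++ [r]).length) := by
          have : k - batch.length = (k - (batch ++ [r]).length) + 1 := by
            simp only [List.length_append, List.length_cons, List.length_nil]; omega
          rw [this]; simp [List.take]
        have hdrop : (r :: rs).drop (k - batch.length)
            = rs.drop (k - (batch ++ [r]).length) := by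
          have : k - batch.length = (k - (batch ++ [r]).length) + 1 := by
            simp only [List.length_append, List.length_cons, List.length_nil]; omega
          rw [this]; simp [List.drop]
        rw [htake, hdrop]
        simp

-- the fold over rows only uses pvFeatures of each row
lemma pvFold_map (bs : Int) (pi : List (List (String × List Int))) :
    pi.foldl
      (fun (s : List (List (List Int)) × List (List Int)) row =>
        let b := s.2 ++ [pvFeatures row]
        if bs ≤ (b.length : Int) then (s.1 ++ [b], []) else (s.1, b))
      (([] : List (List (List Int))), ([] : List (List Int)))
    = (pi.map pvFeatures).foldl
      (fun (s : List (List (List Int)) × List (List Int)) f =>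
        let b := s.2 ++ [f]
        if bs ≤ (b.length : Int) then (s.1 ++ [b], []) else (s.1, b))
      ([], []) := by
  rw [List.foldl_map]

-- ===== VERDICT (by name: the statement is the Claim_ definition above) =====
theorem partition_load_py_spec : Claim_equal_partition_load_py := by
  intro pi bs _ hpre
  obtain ⟨hbs, _⟩ := hpre
  unfold Spec_partition_load_py partition_load_py partition_load_py_alt
  simp only
  rw [pvFold_map bs pi]
  have h := pvFold_eq_chunkSpec bs hbs (pi.map pvFeatures) [] []
    (by simp; omega)
  simp only at h
  rw [h, pvChunkSpec_nil bs.toNat (by omega)]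
  simp
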